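-- pv_equiv track=rewrite | github.com/KobiWare/ctfwriteups | ctfs/bearcatctf2026/rev/the-plank/scripts/solve_final.py | build_affine_transform
-- ===== SOURCE A (Python) =====
-- n = 32
--
-- def mat_mul(A, B):
--     BT = [0]*n
--     for i in range(n):
--         for j in range(n):
--             if B[i] & (1<<j): BT[j] |= (1<<i)
--     R = [0]*n
--     for i in range(n):
--         for j in range(n):
--             if bin(A[i] & BT[j]).count('1') & 1: R[i] |= (1<<j)
--     return R
--
-- def mat_vec(A, v):
--     r = 0
--     for i in range(n):
--         if bin(A[i] & v).count('1') & 1: r |= (1<<i)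
--     return r
--
-- def identity():
--     return [(1<<i) for i in range(n)]
--
-- def build_affine_transform(k, history):
--     """Build the composed affine transformation (A, b) for bit plane k."""
--     A = identity()
--     b = 0
--     mask = (1 << k) - 1
--
--     for j in range(100):
--         y = 140*j + 133
--         op = (2*j) % 5
--
--         if op == 0:  # XOR shift
--             s = y % n
--             A_j = [0]*n
--             for i in range(n):
--                 A_j[i] = (1<<i) | (1<<((i+s)%n))
--             b = mat_vec(A_j, b)
--             A = mat_mul(A_j, A)
--
--         elif op == 1:  # Rotation
--             r = y
--             A_j = [0]*n
--             for i in range(n):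
--                 A_j[i] = 1 << ((i+r)%n)
--             b = mat_vec(A_j, b)
--             A = mat_mul(A_j, A)
--
--         elif op == 2:  # XOR const
--             y_low = y & 0xFF
--             if (y_low >> k) & 1:
--                 b ^= (1<<n) - 1
--
--         elif op == 3:  # Multiply
--             y_mul = y % 256
--             b_j = 0
--             for i in range(n):
--                 val = (history[j][i] * y_mul) if k > 0 else 0
--                 b_j |= (((val >> k) & 1) << i)
--             b ^= b_j
--
--         elif op == 4:  # Add
--             y_add = y % 256
--             add_k = (y_add >> k) & 1
--             b_j = 0
--             if k > 0:
--                 y_add_low = y_add & mask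
--                 for i in range(n):
--                     carry = ((history[j][i] + y_add_low) >> k) & 1
--                     b_j |= ((add_k ^ carry) << i)
--             else:
--                 if add_k:
--                     b_j = (1<<n) - 1
--             b ^= b_j
--
--     return A, b
-- ===== SOURCE B (Python) =====
-- n = 32
--
-- def build_affine_transform(k, history):
--     """Build the composed affine transformation (A, b) for bit plane k.
--
--     Circulant representation: every linear step of the pipeline is a circulant
--     GF(2) matrix (a polynomial in the cyclic rotation R), so the whole linear
--     part is kept as a single 32-bit coefficient mask c (matrix = sum of R^t
--     over set bits t of c) and each linear step is O(1) word ops instead of a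
--     32x32 matrix multiply; b is updated with the matching rotate-XOR formulas.
--     """
--     full = (1 << n) - 1
--
--     def ror(v, t):
--         t %= n
--         return ((v >> t) | (v << (n - t))) & full
--
--     def rol(v, t):
--         t %= n
--         return ((v << t) | (v >> (n - t))) & full
--
--     c = 1  # identity matrix = R^0
--     b = 0
--
--     for j in range(100):
--         y = 140 * j + 133
--         op = (2 * j) % 5
--
--         if op == 0:  # XOR shift: matrix I + R^s
--             s = y % n
--             b ^= ror(b, s)
--             c ^= rol(c, s)
--
--         elif op == 1:  # Rotation: matrix R^r
--             b = ror(b, y)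
--             c = rol(c, y)
--
--         elif op == 2:  # XOR const
--             if ((y & 0xFF) >> k) & 1:
--                 b ^= full
--
--         elif op == 3:  # Multiply
--             y_mul = y % 256
--             b_j = 0
--             for i in range(n):
--                 val = (history[j][i] * y_mul) if k > 0 else 0
--                 b_j |= ((val >> k) & 1) << i
--             b ^= b_j
--
--         else:  # op == 4, Add
--             y_add = y % 256
--             add_k = (y_add >> k) & 1
--             b_j = 0
--             if k > 0:
--                 # y_add < 256, so only the low 8 mask bits can ever matter
--                 low = y_add & ((1 << min(k, 8)) - 1)
--                 for i in range(n):
--                     carry = ((history[j][i] + low) >> k) & 1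
--                     b_j |= (add_k ^ carry) << i
--             elif add_k:
--                 b_j = full
--             b ^= b_j
--
--     return [rol(c, i) for i in range(n)], b
-- ===== Notes on version B (the rewrite author's own statement) =====
-- stated objective: faster
-- what changed: Every linear step of the pipeline is a circulant GF(2) matrix, so B keeps the composed linear part as a single 32-bit circulant coefficient mask updated by one rotate-and-XOR per step (and updates b by the matching rotate formulas), instead of A's per-step 32x32 boolean matrix product with a transpose pass and popcount parity; the row list is expanded from the mask only once at the end.
import Mathlib
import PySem

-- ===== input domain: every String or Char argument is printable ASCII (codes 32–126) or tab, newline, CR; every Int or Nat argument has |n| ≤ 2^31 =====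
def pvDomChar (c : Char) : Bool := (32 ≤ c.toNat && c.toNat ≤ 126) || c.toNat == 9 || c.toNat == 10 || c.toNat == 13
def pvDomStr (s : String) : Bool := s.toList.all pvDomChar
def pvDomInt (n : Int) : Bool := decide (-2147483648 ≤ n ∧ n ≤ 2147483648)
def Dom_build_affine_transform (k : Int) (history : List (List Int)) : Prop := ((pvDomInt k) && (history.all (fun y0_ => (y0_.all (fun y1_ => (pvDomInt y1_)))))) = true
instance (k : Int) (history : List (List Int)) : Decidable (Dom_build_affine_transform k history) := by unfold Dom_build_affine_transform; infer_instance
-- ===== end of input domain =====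

-- B replaces A's per-step 32×32 GF(2) matrix accumulation (transpose + popcount matmul)
-- by a single 32-bit circulant coefficient mask updated with O(1) rotate/XOR word ops.

-- ===== PORT A =====

-- bin(x).count('1'): exact for every value it is applied to here (the left operand of
-- each '&' it is applied to is always < 2^32, so the 32 low bits are all the bits).
def pvPopcount32 (x : Nat) : Nat :=
  (List.range 32).foldl (fun a t => a + (if x.testBit t then 1 else 0)) 0

-- mat_vec(A, v); rows are always length-32 lists here, so getD is exact for A[i]
def pvMatVec (A : List Nat) (v : Nat) : Nat :=
  (List.range 32).foldl (fun r i =>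
    if pvPopcount32 ((A.getD i 0) &&& v) % 2 = 1 then r ||| (1 <<< i) else r) 0

-- the 'BT' local of mat_mul (its transpose pass), lifted out as a helper
def pvTranspose (B : List Nat) : List Nat :=
  (List.range 32).foldl (fun BT i =>
    (List.range 32).foldl (fun BT j =>
      if (B.getD i 0) &&& (1 <<< j) ≠ 0 then BT.set j ((BT.getD j 0) ||| (1 <<< i)) else BT) BT)
    (List.replicate 32 0)

-- mat_mul(A, B); BT is computed once, as in the Python
def pvMatMul (A B : List Nat) : List Nat :=
  let BT := pvTranspose B
  (List.range 32).foldl (fun R i =>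
    (List.range 32).foldl (fun R j =>
      if pvPopcount32 ((A.getD i 0) &&& (BT.getD j 0)) % 2 = 1 then R.set i ((R.getD i 0) ||| (1 <<< j)) else R) R)
    (List.replicate 32 0)

def pvIdentity : List Nat := (List.range 32).map (fun i => 1 <<< i)

-- (val >> k) & 1 for a Python int val and k ≥ 0: Lean's Int >>> is the same arithmetic
-- (floor) shift as Python's >>, and '& 1' is the two's-complement low bit, i.e. emod 2.
def pvBit (val : Int) (k : Nat) : Nat := ((val >>> k).emod 2).toNat

-- one iteration of A's j-loop; state is (A, b).  history[j][i] is ported with getD,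
-- exact whenever the index is in range, which Pre_ guarantees for every accessed cell.
def buildAstep (k : Int) (mask : Nat) (history : List (List Int)) (st : List Nat × Nat) (j : Nat) : List Nat × Nat :=
  let y := 140 * j + 133
  let op := (2 * j) % 5
  if op = 0 then
    let s := y % 32
    let Aj := (List.range 32).map (fun i => (1 <<< i) ||| (1 <<< ((i + s) % 32)))
    (pvMatMul Aj st.1, pvMatVec Aj st.2)
  else if op = 1 then
    let Aj := (List.range 32).map (fun i => 1 <<< ((i + y) % 32))
    (pvMatMul Aj st.1, pvMatVec Aj st.2)
  else if op = 2 then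
    (st.1, if ((y &&& 0xFF) >>> k.toNat) % 2 = 1 then st.2 ^^^ (2 ^ 32 - 1) else st.2)
  else if op = 3 then
    let ymul : Int := (y : Int) % 256
    let bj := (List.range 32).foldl (fun bj i =>
      bj ||| ((pvBit (if k > 0 then ((history.getD j []).getD i 0) * ymul else 0) k.toNat) <<< i)) 0
    (st.1, st.2 ^^^ bj)
  else
    let yadd := y % 256
    let addk := (yadd >>> k.toNat) % 2
    let bj :=
      if k > 0 then
        let low : Nat := yadd &&& mask
        (List.range 32).foldl (fun bj i =>
          bj ||| ((addk ^^^ (pvBit (((history.getD j []).getD i 0) + low) k.toNat)) <<< i)) 0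
      else if addk = 1 then 2 ^ 32 - 1 else 0
    (st.1, st.2 ^^^ bj)

def build_affine_transform (k : Int) (history : List (List Int)) : List Int × Int :=
  let mask := 2 ^ k.toNat - 1   -- mask = (1 << k) - 1, computed once as in the Python
  let st := (List.range 100).foldl (buildAstep k mask history) (pvIdentity, 0)
  (st.1.map Int.ofNat, Int.ofNat st.2)

-- ===== PORT B =====

def pvRor (v t : Nat) : Nat := ((v >>> (t % 32)) ||| (v <<< (32 - t % 32))) &&& (2 ^ 32 - 1)
def pvRol (v t : Nat) : Nat := ((v <<< (t % 32)) ||| (v >>> (32 - t % 32))) &&& (2 ^ 32 - 1)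

-- one iteration of B's j-loop; state is (c, b): c is the circulant coefficient mask
def buildBstep (k : Int) (history : List (List Int)) (st : Nat × Nat) (j : Nat) : Nat × Nat :=
  let y := 140 * j + 133
  let op := (2 * j) % 5
  if op = 0 then
    let s := y % 32
    (st.1 ^^^ pvRol st.1 s, st.2 ^^^ pvRor st.2 s)
  else if op = 1 then
    (pvRol st.1 y, pvRor st.2 y)
  else if op = 2 then
    (st.1, if ((y &&& 0xFF) >>> k.toNat) % 2 = 1 then st.2 ^^^ (2 ^ 32 - 1) else st.2)
  else if op = 3 then
    let ymul : Int := (y : Int) % 256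
    let bj := (List.range 32).foldl (fun bj i =>
      bj ||| ((pvBit (if k > 0 then ((history.getD j []).getD i 0) * ymul else 0) k.toNat) <<< i)) 0
    (st.1, st.2 ^^^ bj)
  else
    let yadd := y % 256
    let addk := (yadd >>> k.toNat) % 2
    let bj :=
      if k > 0 then
        -- yadd < 256: only the low 8 mask bits can matter
        let low : Nat := yadd &&& (2 ^ (min k.toNat 8) - 1)
        (List.range 32).foldl (fun bj i =>
          bj ||| ((addk ^^^ (pvBit (((history.getD j []).getD i 0) + low) k.toNat)) <<< i)) 0
      else if addk = 1 then 2 ^ 32 - 1 else 0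
    (st.1, st.2 ^^^ bj)

def build_affine_transform_alt (k : Int) (history : List (List Int)) : List Int × Int :=
  let st := (List.range 100).foldl (buildBstep k history) (1, 0)
  ((List.range 32).map (fun i => Int.ofNat (pvRol st.1 i)), Int.ofNat st.2)

-- ===== PRECONDITION & SPEC =====
-- A raises outside Pre_: ValueError on k < 0 (mask = (1<<k)-1 / negative shifts); and,
-- only when k > 0 (ops 3/4 read history[j][i] only under 'if k > 0'), IndexError when
-- history has fewer than 100 rows or a row actually indexed by ops 3/4 (those j < 100
-- with j % 5 = 2 or j % 5 = 4) is shorter than 32.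
def Pre_build_affine_transform (k : Int) (history : List (List Int)) : Prop :=
  0 ≤ k ∧ (k = 0 ∨ (100 ≤ history.length ∧
    ((history.take 100).zipIdx.all
      (fun ri => !(decide (ri.2 % 5 = 2 ∨ ri.2 % 5 = 4)) || decide (32 ≤ ri.1.length))) = true))
instance (k : Int) (history : List (List Int)) : Decidable (Pre_build_affine_transform k history) := by
  unfold Pre_build_affine_transform; infer_instance

def pvWitness_build_affine_transform : Int × List (List Int) :=
  (0, List.replicate 100 (List.replicate 32 0))

def Spec_build_affine_transform (k : Int) (history : List (List Int)) (out : List Int × Int) : Prop := out = build_affine_transform_alt k history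
instance (k : Int) (history : List (List Int)) (out : List Int × Int) : Decidable (Spec_build_affine_transform k history out) := by unfold Spec_build_affine_transform; infer_instance

-- ===== CLAIM (what is proved, stated in full; the proofs are below) =====
def Claim_equal_build_affine_transform : Prop := ∀ (k : Int) (history : List (List Int)), Dom_build_affine_transform k history → Pre_build_affine_transform k history → Spec_build_affine_transform k history (build_affine_transform k history)

-- ===== LEMMAS AND PROOFS =====
theorem foldl_orbit (g : Nat → Bool) (m acc t : Nat) :
    (((List.range m).foldl (fun r i => if g i then r ||| (1 <<< i) else r) acc).testBit t)
      = (acc.testBit t || (decide (t < m) && g t)) := by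
  induction m generalizing acc with
  | zero => simp
  | succ m ih =>
      rw [List.range_succ, List.foldl_append]
      simp only [List.foldl_cons, List.foldl_nil]
      by_cases hg : g m
      · rw [if_pos hg, Nat.testBit_or, ih, Nat.one_shiftLeft, Nat.testBit_two_pow]
        by_cases htm : t = m
        · subst htm; simp [hg]
        · have hmt : (m = t) = False := by simp; omega
          by_cases htl : t < m <;>
            simp [hmt, htl, show (t < m + 1) ↔ (t < m) by omega]
      · rw [if_neg hg, ih]
        by_cases htm : t = m
        · subst htm; simp [hg]
        · by_cases htl : t < m <;>
            simp [htl, show (t < m + 1) ↔ (t < m) by omega]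

theorem and_one_shiftLeft (a v : Nat) : (1 <<< a) &&& v = if v.testBit a then 2 ^ a else 0 := by
  apply Nat.eq_of_testBit_eq
  intro t
  rw [Nat.testBit_and, Nat.one_shiftLeft, Nat.testBit_two_pow]
  by_cases h : v.testBit a
  · rw [if_pos h, Nat.testBit_two_pow]
    by_cases hat : a = t
    · subst hat; simp [h]
    · simp [hat]
  · rw [if_neg h]
    by_cases hat : a = t
    · subst hat; simp [h]
    · simp [hat]

theorem pc_countP (x : Nat) : pvPopcount32 x = (List.range 32).countP (fun t => x.testBit t) := by
  unfold pvPopcount32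
  have : ∀ (L : List Nat) (a : Nat),
      L.foldl (fun a t => a + (if x.testBit t then 1 else 0)) a = a + L.countP (fun t => x.testBit t) := by
    intro L
    induction L with
    | nil => simp
    | cons h t ih =>
        intro a
        rw [List.foldl_cons, ih, List.countP_cons]
        by_cases hb : x.testBit h <;> simp [hb] <;> omega
  rw [this]; omega

theorem countP_or_disjoint (p q : Nat → Bool) (L : List Nat) (h : ∀ t, ¬(p t = true ∧ q t = true)) :
    L.countP (fun t => p t || q t) = L.countP p + L.countP q := by
  induction L with
  | nil => simp
  | cons a L ih =>
      rw [List.countP_cons, List.countP_cons, List.countP_cons, ih]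
      have := h a
      by_cases hp : p a <;> by_cases hq : q a <;> simp [hp, hq] at * <;> omega

theorem pc_two_pow (a : Nat) (ha : a < 32) : pvPopcount32 (2 ^ a) = 1 := by
  rw [pc_countP]
  have : ∀ t : Nat, ((2:Nat) ^ a).testBit t = decide (a = t) := fun t => Nat.testBit_two_pow
  simp only [this]
  rw [show (fun t => decide (a = t)) = (fun t => decide (t = a)) by funext t; simp [eq_comm]]
  have h1 : List.countP (fun t => decide (t = a)) (List.range 32) = (List.range 32).count a :=
    Eq.symm List.count_eq_countP
  rw [h1, List.count_range]
  simp [ha]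

theorem pc_single (a v : Nat) (ha : a < 32) :
    (pvPopcount32 ((1 <<< a) &&& v) % 2 = 1) ↔ v.testBit a = true := by
  rw [and_one_shiftLeft]
  by_cases h : v.testBit a
  · simp [h, pc_two_pow a ha]
  · simp [h]
    decide

theorem pc_or_two_pow (a b : Nat) (ha : a < 32) (hb : b < 32) (hne : a ≠ b) :
    pvPopcount32 (2 ^ a ||| 2 ^ b) = 2 := by
  rw [pc_countP]
  have hbit : ∀ t : Nat, ((2:Nat) ^ a ||| 2 ^ b).testBit t = (decide (a = t) || decide (b = t)) := by
    intro t; rw [Nat.testBit_or, Nat.testBit_two_pow, Nat.testBit_two_pow]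
  simp only [hbit]
  rw [countP_or_disjoint _ _ _ (by intro t; simp; omega)]
  have h1 : List.countP (fun t => decide (a = t)) (List.range 32) = (List.range 32).count a := by
    rw [show (fun t : Nat => decide (a = t)) = (fun t => decide (t = a)) by funext t; simp [eq_comm]]
    exact Eq.symm List.count_eq_countP
  have h2 : List.countP (fun t => decide (b = t)) (List.range 32) = (List.range 32).count b := by
    rw [show (fun t : Nat => decide (b = t)) = (fun t => decide (t = b)) by funext t; simp [eq_comm]]
    exact Eq.symm List.count_eq_countP
  rw [h1, h2, List.count_range, List.count_range]
  simp [ha, hb]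

theorem pc_double (a b v : Nat) (ha : a < 32) (hb : b < 32) (hne : a ≠ b) :
    (pvPopcount32 (((1 <<< a) ||| (1 <<< b)) &&& v) % 2 = 1) ↔ (xor (v.testBit a) (v.testBit b)) = true := by
  have hd : ((1 <<< a) ||| (1 <<< b)) &&& v = ((1 <<< a) &&& v) ||| ((1 <<< b) &&& v) := by
    apply Nat.eq_of_testBit_eq
    intro t
    simp only [Nat.testBit_and, Nat.testBit_or]
    cases (1 <<< a).testBit t <;> cases (1 <<< b).testBit t <;> cases v.testBit t <;> rfl
  rw [hd, and_one_shiftLeft, and_one_shiftLeft]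
  by_cases hva : v.testBit a <;> by_cases hvb : v.testBit b <;> simp [hva, hvb]
  · rw [pc_or_two_pow a b ha hb hne]
  · rw [pc_two_pow a ha]
  · rw [pc_two_pow b hb]
  · decide

theorem testBit_high (v t : Nat) (hv : v < 2 ^ 32) (ht : 32 ≤ t) : v.testBit t = false := by
  apply Nat.testBit_lt_two_pow
  calc v < 2 ^ 32 := hv
    _ ≤ 2 ^ t := Nat.pow_le_pow_right (by norm_num) ht

theorem ror_testBit (v s t : Nat) (hv : v < 2 ^ 32) :
    (pvRor v s).testBit t = (decide (t < 32) && v.testBit ((t + s % 32) % 32)) := by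
  unfold pvRor
  rw [Nat.testBit_and, Nat.testBit_two_pow_sub_one, Nat.testBit_or, Nat.testBit_shiftRight,
    Nat.testBit_shiftLeft]
  have hs : s % 32 < 32 := Nat.mod_lt _ (by norm_num)
  by_cases ht : t < 32
  · by_cases htl : t < 32 - s % 32
    · have h2 : v.testBit (t - (32 - s % 32)) = v.testBit ((t + s % 32) % 32) ∨ ¬ 32 - s % 32 ≤ t := by
        right; omega
      have hidx : s % 32 + t = (t + s % 32) % 32 := by omega
      rw [hidx]
      rcases h2 with h | h
      · simp [ht, h]
      · simp [ht, h]
  -- t ≥ 32 - s%32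
    · have h1 : v.testBit (s % 32 + t) = false := testBit_high v _ hv (by omega)
      have hle : 32 - s % 32 ≤ t := by omega
      have hidx : t - (32 - s % 32) = (t + s % 32) % 32 := by omega
      rw [h1, hidx]
      simp [ht, hle]
  · simp [ht]

theorem rol_testBit (v s t : Nat) (hv : v < 2 ^ 32) :
    (pvRol v s).testBit t = (decide (t < 32) && v.testBit ((t + 32 - s % 32) % 32)) := by
  unfold pvRol
  rw [Nat.testBit_and, Nat.testBit_two_pow_sub_one, Nat.testBit_or, Nat.testBit_shiftRight,
    Nat.testBit_shiftLeft]
  have hs : s % 32 < 32 := Nat.mod_lt _ (by norm_num)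
  by_cases ht : t < 32
  · by_cases htl : t < s % 32
    · have hle : ¬ s % 32 ≤ t := by omega
      have hidx : 32 - s % 32 + t = (t + 32 - s % 32) % 32 := by omega
      rw [hidx]
      simp [ht, hle]
    · have h1 : v.testBit (32 - s % 32 + t) = false := testBit_high v _ hv (by omega)
      have hidx : t - s % 32 = (t + 32 - s % 32) % 32 := by omega
      rw [h1, hidx]
      simp [ht, show s % 32 ≤ t by omega]
  · simp [ht]

theorem and_full_lt (x : Nat) : x &&& (2 ^ 32 - 1) < 2 ^ 32 :=
  Nat.lt_of_le_of_lt (Nat.and_le_right) (by norm_num)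

theorem rol_lt (v s : Nat) : pvRol v s < 2 ^ 32 := and_full_lt _

theorem ror_lt (v s : Nat) : pvRor v s < 2 ^ 32 := and_full_lt _

theorem matVec_testBit (A : List Nat) (v t : Nat) :
    (pvMatVec A v).testBit t
      = (decide (t < 32) && decide (pvPopcount32 ((A.getD t 0) &&& v) % 2 = 1)) := by
  unfold pvMatVec
  rw [show (fun (r i : Nat) => if pvPopcount32 ((A.getD i 0) &&& v) % 2 = 1 then r ||| (1 <<< i) else r)
      = (fun r i => if (fun i => decide (pvPopcount32 ((A.getD i 0) &&& v) % 2 = 1)) i then r ||| (1 <<< i) else r) by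
    funext r i; by_cases h : pvPopcount32 ((A.getD i 0) &&& v) % 2 = 1 <;> simp [h]]
  rw [foldl_orbit]
  simp

theorem lt_two_pow_of_high_false (x : Nat) (h : ∀ t, 32 ≤ t → x.testBit t = false) : x < 2 ^ 32 :=
  Nat.lt_pow_two_of_testBit x h

-- length preservation through a fold whose steps preserve length

theorem foldl_len {step : List Nat → Nat → List Nat}
    (h : ∀ BT j, (step BT j).length = BT.length) (L : List Nat) (BT : List Nat) :
    (L.foldl step BT).length = BT.length := by
  induction L generalizing BT with
  | nil => rfl
  | cons a L ih => rw [List.foldl_cons, ih, h]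

-- ---- the BT (transpose) inner loop: one pass over j setting independent cells ----

theorem innerB_getD_notmem (cond : Nat → Bool) (w : Nat) (L : List Nat) (BT : List Nat)
    (j : Nat) (hj : j ∉ L) :
    (L.foldl (fun BT j' => if cond j' then BT.set j' ((BT.getD j' 0) ||| w) else BT) BT).getD j 0
      = BT.getD j 0 := by
  induction L generalizing BT with
  | nil => rfl
  | cons a L ih =>
      rw [List.foldl_cons, ih _ (by simp at hj; exact hj.2)]
      have hne : a ≠ j := by simp at hj; omega
      by_cases hc : cond a
      · simp [hc, List.getD_eq_getElem?_getD, List.getElem?_set_ne hne]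
      · simp [hc]

theorem innerB_getD (cond : Nat → Bool) (w : Nat) (L : List Nat) (hnd : L.Nodup)
    (BT : List Nat) (j : Nat) (hj : j < BT.length) :
    (L.foldl (fun BT j' => if cond j' then BT.set j' ((BT.getD j' 0) ||| w) else BT) BT).getD j 0
      = if j ∈ L ∧ cond j then (BT.getD j 0) ||| w else BT.getD j 0 := by
  induction L generalizing BT with
  | nil => simp
  | cons a L ih =>
      rw [List.foldl_cons]
      by_cases haj : a = j
      · subst haj
        have hnotin : a ∉ L := (List.nodup_cons.mp hnd).1
        rw [innerB_getD_notmem _ _ _ _ _ hnotin]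
        by_cases hc : cond a
        · simp [hc, List.getD_eq_getElem?_getD, List.getElem?_set_self hj]
        · simp [hc]
      · have h2 : ∀ BT' : List Nat,
            (if cond a then BT'.set a ((BT'.getD a 0) ||| w) else BT').getD j 0 = BT'.getD j 0 := by
          intro BT'
          by_cases hc : cond a
          · simp [hc, List.getD_eq_getElem?_getD, List.getElem?_set_ne haj]
          · simp [hc]
        have hlen : (if cond a then BT.set a ((BT.getD a 0) ||| w) else BT).length = BT.length := by
          by_cases hc : cond a <;> simp [hc]
        rw [ih (List.nodup_cons.mp hnd).2 _ (by omega : j < (if cond a then BT.set a ((BT.getD a 0) ||| w) else BT).length)]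
        rw [h2]
        simp [Ne.symm haj]

-- ---- the R (result) inner loop: accumulates bits into the single row i ----

theorem innerR_getD (cond : Nat → Bool) (i : Nat) (L : List Nat) (R : List Nat)
    (hi : i < R.length) :
    (L.foldl (fun R j => if cond j then R.set i ((R.getD i 0) ||| (1 <<< j)) else R) R).getD i 0
      = L.foldl (fun r j => if cond j then r ||| (1 <<< j) else r) (R.getD i 0) := by
  induction L generalizing R with
  | nil => rfl
  | cons a L ih =>
      rw [List.foldl_cons, List.foldl_cons]
      by_cases hc : cond a
      · have hlen : (R.set i ((R.getD i 0) ||| (1 <<< a))).length = R.length := by simp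
        rw [if_pos hc, if_pos hc, ih _ (by omega)]
        congr 1
        simp [List.getD_eq_getElem?_getD, List.getElem?_set_self hi]
      · rw [if_neg hc, if_neg hc, ih _ hi]

theorem innerR_getD_ne (cond : Nat → Bool) (i : Nat) (L : List Nat) (R : List Nat)
    (i' : Nat) (hne : i' ≠ i) :
    (L.foldl (fun R j => if cond j then R.set i ((R.getD i 0) ||| (1 <<< j)) else R) R).getD i' 0
      = R.getD i' 0 := by
  induction L generalizing R with
  | nil => rfl
  | cons a L ih =>
      rw [List.foldl_cons, ih]
      by_cases hc : cond a
      · simp [hc, List.getD_eq_getElem?_getD, List.getElem?_set_ne (Ne.symm hne)]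
      · simp [hc]

theorem innerR_length (cond : Nat → Bool) (i : Nat) (L : List Nat) (R : List Nat) :
    (L.foldl (fun R j => if cond j then R.set i ((R.getD i 0) ||| (1 <<< j)) else R) R).length
      = R.length := by
  apply foldl_len
  intro BT j
  by_cases hc : cond j <;> simp [hc]

-- ---- outer loops ----

theorem outerR_getD (condR : Nat → Nat → Bool) (L : List Nat) (hnd : L.Nodup)
    (R : List Nat) (i : Nat) (hi : i < R.length) :
    ((L.foldl (fun R i' => (List.range 32).foldl
        (fun R j => if condR i' j then R.set i' ((R.getD i' 0) ||| (1 <<< j)) else R) R) R).getD i 0)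
      = if i ∈ L then (List.range 32).foldl
          (fun r j => if condR i j then r ||| (1 <<< j) else r) (R.getD i 0)
        else R.getD i 0 := by
  induction L generalizing R with
  | nil => simp
  | cons a L ih =>
      rw [List.foldl_cons]
      have hlen : ∀ R' : List Nat, ((List.range 32).foldl
          (fun R j => if condR a j then R.set a ((R.getD a 0) ||| (1 <<< j)) else R) R').length = R'.length :=
        fun R' => innerR_length _ _ _ _
      by_cases hai : a = i
      · subst hai
        rw [ih hnd.of_cons _ (by rw [hlen]; exact hi)]
        by_cases hmem : a ∈ L
        · exact absurd hmem (List.nodup_cons.mp hnd).1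
        · rw [if_neg hmem, innerR_getD _ _ _ _ hi, if_pos (List.mem_cons_self)]
      · rw [ih hnd.of_cons _ (by rw [hlen]; exact hi)]
        rw [innerR_getD_ne _ _ _ _ _ (Ne.symm hai)]
        simp [Ne.symm hai]

theorem outerB_getD (condB : Nat → Nat → Bool) (L : List Nat) (BT : List Nat)
    (j : Nat) (hj : j < 32) (hlen : BT.length = 32) :
    ((L.foldl (fun BT i => (List.range 32).foldl
        (fun BT j' => if condB i j' then BT.set j' ((BT.getD j' 0) ||| (1 <<< i)) else BT) BT) BT).getD j 0)
      = L.foldl (fun w i => if condB i j then w ||| (1 <<< i) else w) (BT.getD j 0) := by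
  induction L generalizing BT with
  | nil => rfl
  | cons a L ih =>
      rw [List.foldl_cons, List.foldl_cons]
      have hlen2 : ((List.range 32).foldl
          (fun BT j' => if condB a j' then BT.set j' ((BT.getD j' 0) ||| (1 <<< a)) else BT) BT).length = 32 := by
        rw [foldl_len (fun BT' j' => by by_cases hc : condB a j' <;> simp [hc])]
        exact hlen
      rw [ih _ hlen2]
      congr 1
      rw [innerB_getD _ _ _ (List.nodup_range) _ _ (by omega)]
      simp [hj, List.mem_range]

-- the 'BT' local of mat_mul (the transpose pass), lifted out as a helper

theorem and_shiftLeft_ne_zero (x j : Nat) : ((x &&& (1 <<< j) ≠ 0)) ↔ x.testBit j = true := by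
  rw [Nat.and_comm, and_one_shiftLeft]
  by_cases h : x.testBit j <;> simp [h]

theorem getD_replicate_zero (i : Nat) : (List.replicate 32 (0:Nat)).getD i 0 = 0 := by
  rw [List.getD_eq_getElem?_getD]
  rcases Nat.lt_or_ge i 32 with h | h
  · rw [List.getElem?_eq_getElem (by simpa using h), List.getElem_replicate]
    rfl
  · rw [List.getElem?_eq_none (by simpa using h)]
    rfl

theorem matMul_length (A B : List Nat) : (pvMatMul A B).length = 32 := by
  simp only [pvMatMul]
  rw [foldl_len]
  · simp
  · intro R i
    rw [foldl_len]
    intro R' j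
    split <;> simp

theorem matMul_getD (A B : List Nat) (i : Nat) (hi : i < 32) (t : Nat) :
    ((pvMatMul A B).getD i 0).testBit t
      = (decide (t < 32) && decide (pvPopcount32 ((A.getD i 0) &&&
          ((List.range 32).foldl (fun w x => if (B.getD x 0).testBit t then w ||| (1 <<< x) else w) 0)) % 2 = 1)) := by
  simp only [pvMatMul]
  set BT := pvTranspose B with hBT
  -- Prop-if to Bool-if for the R fold
  have hstep : (fun (R : List Nat) (i' : Nat) => (List.range 32).foldl (fun R j =>
        if pvPopcount32 ((A.getD i' 0) &&& (BT.getD j 0)) % 2 = 1 then R.set i' ((R.getD i' 0) ||| (1 <<< j)) else R) R)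
      = (fun R i' => (List.range 32).foldl (fun R j =>
        if (fun i' j => decide (pvPopcount32 ((A.getD i' 0) &&& (BT.getD j 0)) % 2 = 1)) i' j = true
        then R.set i' ((R.getD i' 0) ||| (1 <<< j)) else R) R) := by
    funext R i'
    congr 1
    funext R' j
    by_cases h : pvPopcount32 ((A.getD i' 0) &&& (BT.getD j 0)) % 2 = 1 <;> simp [h]
  rw [hstep, outerR_getD _ _ List.nodup_range _ _ (by simp; omega)]
  rw [if_pos (List.mem_range.mpr hi)]
  rw [getD_replicate_zero, foldl_orbit]
  rw [Nat.zero_testBit, Bool.false_or]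
  by_cases ht : t < 32
  · -- BT.getD t 0 equals the column fold
    have hBTt : BT.getD t 0 = (List.range 32).foldl
        (fun w x => if (B.getD x 0).testBit t then w ||| (1 <<< x) else w) 0 := by
      rw [hBT]
      unfold pvTranspose
      have hstepB : (fun (BT : List Nat) (x : Nat) => (List.range 32).foldl (fun BT j =>
            if (B.getD x 0) &&& (1 <<< j) ≠ 0 then BT.set j ((BT.getD j 0) ||| (1 <<< x)) else BT) BT)
          = (fun BT x => (List.range 32).foldl (fun BT j =>
            if (fun x j => decide ((B.getD x 0) &&& (1 <<< j) ≠ 0)) x j = true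
            then BT.set j ((BT.getD j 0) ||| (1 <<< x)) else BT) BT) := by
        funext BT x
        congr 1
        funext BT' j
        by_cases h : (B.getD x 0) &&& (1 <<< j) ≠ 0 <;> simp [h]
      rw [hstepB, outerB_getD _ _ _ _ ht (by simp)]
      rw [getD_replicate_zero]
      congr 1
      funext w x
      congr 1
      rw [show (decide ((B.getD x 0) &&& (1 <<< t) ≠ 0)) = (B.getD x 0).testBit t by
        generalize (B.getD x 0) = v
        by_cases h : v.testBit t
        · simp [h, (and_shiftLeft_ne_zero v t).mpr h]
        · have hz : v &&& (1 <<< t) = 0 := by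
            rw [Nat.and_comm, and_one_shiftLeft]
            simp [h]
          simp [h, hz]]
  -- done with BT; close the main goal
    rw [hBTt]
  · simp [ht]

def circRows (c : Nat) : List Nat := (List.range 32).map (fun i => pvRol c i)

theorem map_range_getD (f : Nat → Nat) (i : Nat) (hi : i < 32) :
    (((List.range 32).map f).getD i 0) = f i := by
  rw [List.getD_eq_getElem?_getD, List.getElem?_map]
  rw [List.getElem?_range hi]
  rfl

theorem circRows_getD (c i : Nat) (hi : i < 32) : (circRows c).getD i 0 = pvRol c i :=
  map_range_getD _ i hi

theorem matvec_shift (s b : Nat) (hs : s < 32) (hs0 : s ≠ 0) (hb : b < 2 ^ 32) :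
    pvMatVec ((List.range 32).map (fun i => (1 <<< i) ||| (1 <<< ((i + s) % 32)))) b
      = b ^^^ pvRor b s := by
  apply Nat.eq_of_testBit_eq
  intro t
  rw [matVec_testBit, Nat.testBit_xor, ror_testBit _ _ _ hb]
  by_cases ht : t < 32
  · rw [map_range_getD _ t ht]
    have hts : (t + s) % 32 < 32 := Nat.mod_lt _ (by norm_num)
    have hne : t ≠ (t + s) % 32 := by omega
    have := pc_double t ((t + s) % 32) b ht hts hne
    rw [show (decide (pvPopcount32 (((1 <<< t) ||| (1 <<< ((t + s) % 32))) &&& b) % 2 = 1))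
        = (xor (b.testBit t) (b.testBit ((t + s) % 32))) by
      by_cases h : xor (b.testBit t) (b.testBit ((t + s) % 32)) = true
      · simp [h, this.mpr h]
      · simp at h
        simp [h, this]]
    rw [Nat.mod_eq_of_lt hs]
    simp [ht]
  · simp [ht, testBit_high b t hb (by omega)]

theorem matvec_rot (r b : Nat) (hb : b < 2 ^ 32) :
    pvMatVec ((List.range 32).map (fun i => 1 <<< ((i + r) % 32))) b = pvRor b r := by
  apply Nat.eq_of_testBit_eq
  intro t
  rw [matVec_testBit, ror_testBit _ _ _ hb]
  by_cases ht : t < 32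
  · rw [map_range_getD _ t ht]
    have htr : (t + r) % 32 < 32 := Nat.mod_lt _ (by norm_num)
    have := pc_single ((t + r) % 32) b htr
    rw [show (decide (pvPopcount32 ((1 <<< ((t + r) % 32)) &&& b) % 2 = 1))
        = b.testBit ((t + r) % 32) by
      by_cases h : b.testBit ((t + r) % 32)
      · simp [h, this.mpr h]
      · simp [h, this]]
    rw [show (t + r % 32) % 32 = (t + r) % 32 by omega]
  · simp [ht]

theorem matmul_shift (s c : Nat) (hs : s < 32) (hs0 : s ≠ 0) (hc : c < 2 ^ 32) :
    pvMatMul ((List.range 32).map (fun i => (1 <<< i) ||| (1 <<< ((i + s) % 32)))) (circRows c)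
      = circRows (c ^^^ pvRol c s) := by
  have hx : c ^^^ pvRol c s < 2 ^ 32 := Nat.xor_lt_two_pow hc (rol_lt c s)
  apply List.ext_getElem (by rw [matMul_length]; simp [circRows])
  intro i hi1 hi2
  have hi : i < 32 := by simpa [matMul_length] using hi1
  rw [← List.getD_eq_getElem _ 0, ← List.getD_eq_getElem _ 0]
  rw [circRows_getD _ _ hi]
  apply Nat.eq_of_testBit_eq
  intro t
  rw [matMul_getD _ _ i hi t, rol_testBit _ _ _ hx]
  by_cases ht : t < 32
  · rw [map_range_getD _ i hi]
    -- the column value and its bits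
    set v := (List.range 32).foldl
        (fun w x => if ((circRows c).getD x 0).testBit t then w ||| (1 <<< x) else w) 0 with hv
    have hvbit : ∀ x, x < 32 → v.testBit x = (pvRol c x).testBit t := by
      intro x hx32
      rw [hv, foldl_orbit, circRows_getD _ _ hx32]
      simp [hx32]
    have his : (i + s) % 32 < 32 := Nat.mod_lt _ (by norm_num)
    have hne : i ≠ (i + s) % 32 := by omega
    have hpd := pc_double i ((i + s) % 32) v hi his hne
    rw [show (decide (pvPopcount32 (((1 <<< i) ||| (1 <<< ((i + s) % 32))) &&& v) % 2 = 1))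
        = (xor (v.testBit i) (v.testBit ((i + s) % 32))) by
      by_cases h : xor (v.testBit i) (v.testBit ((i + s) % 32)) = true
      · simp [h, hpd.mpr h]
      · simp at h
        simp [h, hpd]]
    rw [hvbit i hi, hvbit _ his]
    rw [rol_testBit _ _ _ hc, rol_testBit _ _ _ hc, Nat.testBit_xor,
      rol_testBit _ _ _ hc]
    have hidx : ((i + s) % 32) % 32 = (i + s) % 32 := by omega
    have hidx2 : (t + 32 - (i + s) % 32 % 32) % 32 = ((t + 32 - i % 32) % 32 + 32 - s % 32) % 32 := by
      omega
    rw [hidx2]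
    simp [ht, show (t + 32 - i % 32) % 32 < 32 by omega]
  · simp [ht]

theorem matmul_rot (r c : Nat) (hc : c < 2 ^ 32) :
    pvMatMul ((List.range 32).map (fun i => 1 <<< ((i + r) % 32))) (circRows c)
      = circRows (pvRol c r) := by
  have hx : pvRol c r < 2 ^ 32 := rol_lt c r
  apply List.ext_getElem (by rw [matMul_length]; simp [circRows])
  intro i hi1 hi2
  have hi : i < 32 := by simpa [matMul_length] using hi1
  rw [← List.getD_eq_getElem _ 0, ← List.getD_eq_getElem _ 0]
  rw [circRows_getD _ _ hi]
  apply Nat.eq_of_testBit_eq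
  intro t
  rw [matMul_getD _ _ i hi t, rol_testBit _ _ _ hx]
  by_cases ht : t < 32
  · rw [map_range_getD _ i hi]
    set v := (List.range 32).foldl
        (fun w x => if ((circRows c).getD x 0).testBit t then w ||| (1 <<< x) else w) 0 with hv
    have hvbit : ∀ x, x < 32 → v.testBit x = (pvRol c x).testBit t := by
      intro x hx32
      rw [hv, foldl_orbit, circRows_getD _ _ hx32]
      simp [hx32]
    have hir : (i + r) % 32 < 32 := Nat.mod_lt _ (by norm_num)
    have hps := pc_single ((i + r) % 32) v hir
    rw [show (decide (pvPopcount32 ((1 <<< ((i + r) % 32)) &&& v) % 2 = 1))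
        = v.testBit ((i + r) % 32) by
      by_cases h : v.testBit ((i + r) % 32)
      · simp [h, hps.mpr h]
      · simp [h, hps]]
    rw [hvbit _ hir, rol_testBit _ _ _ hc, rol_testBit _ _ _ hc]
    have hidx : (t + 32 - (i + r) % 32 % 32) % 32 = ((t + 32 - i % 32) % 32 + 32 - r % 32) % 32 := by
      omega
    rw [hidx]
    simp [ht, show (t + 32 - i % 32) % 32 < 32 by omega]
  · simp [ht]

-- the matrix represented by coefficient mask c: row i is rol(c, i)
-- (already defined above as circRows)

-- relation between A's loop state and B's loop state
def pvInv (st : List Nat × Nat) (cb : Nat × Nat) : Prop :=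
  st.1 = circRows cb.1 ∧ st.2 = cb.2 ∧ cb.1 < 2 ^ 32 ∧ cb.2 < 2 ^ 32

theorem foldl_bits_lt (e : Nat → Nat) (he : ∀ i, e i ≤ 1) :
    (List.range 32).foldl (fun bj i => bj ||| ((e i) <<< i)) 0 < 2 ^ 32 := by
  have hstep : (fun (bj i : Nat) => bj ||| ((e i) <<< i))
      = (fun bj i => if (fun i => decide (e i = 1)) i then bj ||| (1 <<< i) else bj) := by
    funext bj i
    rcases Nat.le_one_iff_eq_zero_or_eq_one.mp (he i) with h | h <;> simp [h]
  rw [hstep]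
  apply lt_two_pow_of_high_false
  intro t ht
  rw [foldl_orbit]
  simp [show ¬ t < 32 by omega]

theorem pvBit_le_one (val : Int) (k : Nat) : pvBit val k ≤ 1 := by
  unfold pvBit
  have h := Int.emod_emod_of_dvd (val >>> k) (dvd_refl 2)
  have h1 : (val >>> k).emod 2 < 2 := Int.emod_lt_of_pos _ (by norm_num)
  omega

theorem xor_le_one (a b : Nat) (ha : a ≤ 1) (hb : b ≤ 1) : a ^^^ b ≤ 1 := by
  rcases Nat.le_one_iff_eq_zero_or_eq_one.mp ha with h | h <;>
    rcases Nat.le_one_iff_eq_zero_or_eq_one.mp hb with h' | h' <;> subst h <;> subst h' <;> decide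

theorem step_pres (k : Int) (history : List (List Int)) (j : Nat) (st : List Nat × Nat)
    (cb : Nat × Nat) (h : pvInv st cb) :
    pvInv (buildAstep k (2 ^ k.toNat - 1) history st j) (buildBstep k history cb j) := by
  obtain ⟨h1, h2, hc, hb⟩ := h
  simp only [buildAstep, buildBstep]
  by_cases h0 : (2 * j) % 5 = 0
  · rw [if_pos h0, if_pos h0]
    have hs : (140 * j + 133) % 32 < 32 := Nat.mod_lt _ (by norm_num)
    have hs0 : (140 * j + 133) % 32 ≠ 0 := by omega
    refine ⟨?_, ?_, Nat.xor_lt_two_pow hc (rol_lt _ _), Nat.xor_lt_two_pow hb (ror_lt _ _)⟩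
    · rw [h1, matmul_shift _ _ hs hs0 hc]
    · rw [h2, matvec_shift _ _ hs hs0 hb]
  · rw [if_neg h0, if_neg h0]
    by_cases hop1 : (2 * j) % 5 = 1
    · rw [if_pos hop1, if_pos hop1]
      refine ⟨?_, ?_, rol_lt _ _, ror_lt _ _⟩
      · rw [h1, matmul_rot _ _ hc]
      · rw [h2, matvec_rot _ _ hb]
    · rw [if_neg hop1, if_neg hop1]
      by_cases hop2 : (2 * j) % 5 = 2
      · rw [if_pos hop2, if_pos hop2]
        refine ⟨h1, ?_, hc, ?_⟩
        · rw [h2]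
        · split
          · exact Nat.xor_lt_two_pow hb (by norm_num)
          · exact hb
      · rw [if_neg hop2, if_neg hop2]
        by_cases hop3 : (2 * j) % 5 = 3
        · rw [if_pos hop3, if_pos hop3]
          refine ⟨h1, by rw [h2], hc, ?_⟩
          exact Nat.xor_lt_two_pow hb (foldl_bits_lt _ (fun i => pvBit_le_one _ _))
        · rw [if_neg hop3, if_neg hop3]
          have hlow : ((140 * j + 133) % 256) &&& (2 ^ k.toNat - 1)
              = ((140 * j + 133) % 256) &&& (2 ^ (min k.toNat 8) - 1) := by
            rw [Nat.and_two_pow_sub_one_eq_mod, Nat.and_two_pow_sub_one_eq_mod]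
            by_cases hk : k.toNat ≤ 8
            · rw [Nat.min_eq_left hk]
            · rw [Nat.min_eq_right (by omega)]
              have hy : (140 * j + 133) % 256 < 256 := Nat.mod_lt _ (by norm_num)
              have hle : (256:Nat) ≤ 2 ^ k.toNat := by
                calc (256:Nat) = 2 ^ 8 := by norm_num
                  _ ≤ 2 ^ k.toNat := Nat.pow_le_pow_right (by norm_num) (by omega)
              rw [Nat.mod_eq_of_lt (show (140 * j + 133) % 256 < 2 ^ k.toNat by omega),
                Nat.mod_eq_of_lt (show (140 * j + 133) % 256 < 2 ^ 8 by omega)]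
          simp only [hlow]
          refine ⟨h1, by rw [h2], hc, ?_⟩
          apply Nat.xor_lt_two_pow hb
          split
          · apply foldl_bits_lt
            intro i
            exact xor_le_one _ _ (by omega) (pvBit_le_one _ _)
          · split <;> norm_num

theorem foldl_rel {α β : Type} (R : α → β → Prop) (f : α → Nat → α) (g : β → Nat → β)
    (L : List Nat) (a : α) (b : β) (hab : R a b)
    (hstep : ∀ j ∈ L, ∀ a b, R a b → R (f a j) (g b j)) :
    R (L.foldl f a) (L.foldl g b) := by
  induction L generalizing a b with
  | nil => exact hab
  | cons x L ih =>
      exact ih _ _ (hstep x (List.mem_cons_self) a b hab)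
        (fun j hj => hstep j (List.mem_cons_of_mem _ hj))

theorem identity_circ : pvIdentity = circRows 1 := by
  unfold pvIdentity circRows
  apply List.ext_getElem (by simp)
  intro i h1 h2
  have hi : i < 32 := by simpa using h1
  rw [← List.getD_eq_getElem _ 0, ← List.getD_eq_getElem _ 0,
    map_range_getD _ _ hi, map_range_getD _ _ hi]
  apply Nat.eq_of_testBit_eq
  intro t
  rw [rol_testBit _ _ _ (by norm_num), Nat.one_shiftLeft, Nat.testBit_two_pow,
    show (1:Nat) = 2 ^ 0 from rfl, Nat.testBit_two_pow]
  by_cases ht : t < 32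
  · by_cases hit : i = t
    · subst hit
      simp [ht, show (i + 32 - i % 32) % 32 = 0 by omega]
    · simp [hit, ht, show ¬ (0 = (t + 32 - i % 32) % 32) by omega]
  · simp [ht, show ¬ i = t by omega]

-- ===== VERDICT (by name: the statement is the Claim_ definition above) =====
theorem build_affine_transform_spec : Claim_equal_build_affine_transform := by
  intro k history _ _
  unfold Spec_build_affine_transform build_affine_transform build_affine_transform_alt
  have h := foldl_rel pvInv (buildAstep k (2 ^ k.toNat - 1) history) (buildBstep k history) (List.range 100)
    (pvIdentity, 0) (1, 0)
    ⟨identity_circ, rfl, by norm_num, by norm_num⟩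
    (fun j _ => step_pres k history j)
  obtain ⟨h1, h2, -, -⟩ := h
  simp only [h1, h2, circRows, List.map_map]
  rfl
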